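-- pv_equiv track=rewrite | github.com/diogofferreira/nypto | profiling.py | extract_silence
-- ===== SOURCE A (Python) =====
-- def extract_silence(data, threshold=256):
--     s = [1] if data[0] <= threshold else []
--
--     for i in range(1, len(data)):
--         if data[i] <= threshold:
--             if data[i-1] > threshold:
--                 s.append(1)
--             elif data[i-1] <= threshold:
--                 s[-1] += 1
--
--     return s if s != [] else [0]
-- ===== SOURCE B (Python) =====
-- def extract_silence(data, threshold=256):
--     # Boundary/gap view: silence runs are the gaps between consecutive loud
--     # elements (with virtual loud sentinels at index -1 and len(data)).
--     loud = [i for i, x in enumerate(data) if x > threshold]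
--     bounds = [-1] + loud + [len(data)]
--     gaps = [b - a - 1 for a, b in zip(bounds, bounds[1:])]
--     runs = [g for g in gaps if g > 0]
--     return runs if runs else [0]
-- ===== Notes on version B (the rewrite author's own statement) =====
-- stated objective: alternative
-- what changed: B computes silence runs as arithmetic gaps between consecutive loud-element indices (with sentinel boundaries -1 and len(data)) via a staged pipeline of enumerate/zip, instead of A's previous-element state machine mutating the last list entry in place.
import Mathlib
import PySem

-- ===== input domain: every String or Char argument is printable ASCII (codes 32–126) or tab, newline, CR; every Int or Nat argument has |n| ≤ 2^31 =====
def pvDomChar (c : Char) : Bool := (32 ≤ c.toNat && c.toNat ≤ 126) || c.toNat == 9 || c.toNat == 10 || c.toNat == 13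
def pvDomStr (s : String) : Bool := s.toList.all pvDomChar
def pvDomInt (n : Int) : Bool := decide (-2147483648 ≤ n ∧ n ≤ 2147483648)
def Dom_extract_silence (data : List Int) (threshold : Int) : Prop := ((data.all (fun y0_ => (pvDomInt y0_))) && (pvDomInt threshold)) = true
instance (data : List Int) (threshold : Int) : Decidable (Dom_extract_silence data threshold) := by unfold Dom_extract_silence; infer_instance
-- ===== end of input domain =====

-- B computes silence runs as gaps between consecutive loud-element indices (with
-- sentinels -1 and len(data)) instead of A's previous-element state machine; objective: alternative.

-- ===== PORT A =====
-- s[-1] += 1 : increment the last element of the list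
def pvIncLast : List Int → List Int
  | [] => []
  | [x] => [x + 1]
  | x :: xs => x :: pvIncLast xs

-- the for-loop over i in range(1, len(data)): prev = data[i-1], x = data[i]
def pvLoopA (threshold : Int) : Int → List Int → List Int → List Int
  | _, [], s => s
  | prev, x :: xs, s =>
    let s' := if x ≤ threshold then
                (if prev > threshold then s ++ [1] else pvIncLast s)
              else s
    pvLoopA threshold x xs s'

def extract_silence (data : List Int) (threshold : Int) : List Int :=
  match data with
  | [] => []  -- data[0] raises IndexError in Python; excluded by Pre_
  | d0 :: rest =>
    let s0 := if d0 ≤ threshold then [1] else []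
    let s := pvLoopA threshold d0 rest s0
    if s ≠ [] then s else [0]

-- ===== PORT B =====
def extract_silence_alt (data : List Int) (threshold : Int) : List Int :=
  let loud := ((PySem.List.enumerate data).filter (fun p => threshold < p.2)).map (fun p => p.1)
  let bounds := [(-1 : Int)] ++ loud ++ [(data.length : Int)]
  let gaps := (bounds.zip bounds.tail).map (fun p => p.2 - p.1 - 1)
  let runs := gaps.filter (fun g => 0 < g)
  if runs ≠ [] then runs else [0]

-- ===== PRECONDITION & SPEC =====
-- Pre_ excludes only the empty list, on which A raises IndexError indexing data[0].
def Pre_extract_silence (data : List Int) (threshold : Int) : Prop := data ≠ []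
instance (data : List Int) (threshold : Int) : Decidable (Pre_extract_silence data threshold) := by unfold Pre_extract_silence; infer_instance
def pvWitness_extract_silence : List Int × Int := ([1, 500, 2, 3], 256)

def Spec_extract_silence (data : List Int) (threshold : Int) (out : List Int) : Prop := out = extract_silence_alt data threshold
instance (data : List Int) (threshold : Int) (out : List Int) : Decidable (Spec_extract_silence data threshold out) := by unfold Spec_extract_silence; infer_instance

-- ===== CLAIM =====
def Claim_equal_extract_silence : Prop := ∀ (data : List Int) (threshold : Int), Dom_extract_silence data threshold → Pre_extract_silence data threshold → Spec_extract_silence data threshold (extract_silence data threshold)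

-- ===== LEMMAS AND PROOFS =====

-- recursive characterization of B's gap pipeline, with previous boundary p and next index i
def gapsFrom (t p i : Int) : List Int → List Int
  | [] => [i - p - 1]
  | x :: xs => if t < x then (i - p - 1) :: gapsFrom t i (i + 1) xs else gapsFrom t p (i + 1) xs

lemma pipe_eq (t : Int) : ∀ (xs : List Int) (i p : Int),
    (let bounds := p :: (((PySem.List.enumerate xs i).filter (fun q => t < q.2)).map (fun q => q.1)) ++ [i + (xs.length : Int)];
     (bounds.zip bounds.tail).map (fun q => q.2 - q.1 - 1)) = gapsFrom t p i xs := by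
  intro xs
  induction xs with
  | nil => intro i p; simp [PySem.List.enumerate_nil, gapsFrom]
  | cons x xs ih =>
    intro i p
    by_cases hx : t < x
    · have hrec := ih (i + 1) i
      simp only [PySem.List.enumerate_cons, List.filter_cons, hx, decide_true,
        List.map_cons, List.cons_append, List.tail_cons, List.zip_cons_cons,
        List.map_cons, gapsFrom, if_pos hx] at hrec ⊢
      rw [show i + ((x :: xs).length : Int) = (i + 1) + (xs.length : Int) by simp only [List.length_cons]; push_cast; ring]
      exact congrArg (fun l => (i - p - 1) :: l) hrec
    · have hrec := ih (i + 1) p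
      simp only [PySem.List.enumerate_cons, List.filter_cons, hx, decide_false,
        gapsFrom, if_neg hx] at hrec ⊢
      rw [show i + ((x :: xs).length : Int) = (i + 1) + (xs.length : Int) by simp only [List.length_cons]; push_cast; ring]
      exact hrec

lemma pvIncLast_append (l : List Int) (c : Int) : pvIncLast (l ++ [c]) = l ++ [c + 1] := by
  induction l with
  | nil => rfl
  | cons x xs ih =>
    cases xs with
    | nil => simp [pvIncLast]
    | cons y ys => simpa [pvIncLast] using ih

-- loop invariant: A's list s equals emitted runs, and the pending run (if any) is i - p - 1
lemma pvLoop_gaps (t : Int) :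
    ∀ (rest : List Int) (prev i p : Int) (s runs : List Int),
      ((prev ≤ t ∧ s = runs ++ [i - p - 1] ∧ 1 ≤ i - p - 1) ∨ (¬ prev ≤ t ∧ s = runs ∧ p = i - 1)) →
      pvLoopA t prev rest s = runs ++ (gapsFrom t p i rest).filter (fun g => 0 < g) := by
  intro rest
  induction rest with
  | nil =>
    intro prev i p s runs h
    rcases h with ⟨_, hs, hc⟩ | ⟨_, hs, hp⟩
    · simp [pvLoopA, gapsFrom, hs, List.filter_cons]; omega
    · simp [pvLoopA, gapsFrom, hs, hp, List.filter_cons, show ¬ (0 : Int) < i - (i - 1) - 1 by omega]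
  | cons x xs ih =>
    intro prev i p s runs h
    rcases h with ⟨hp, hs, hc⟩ | ⟨hp, hs, hpp⟩
    · by_cases hx : x ≤ t
      · have h1 : pvLoopA t prev (x :: xs) s = pvLoopA t x xs (runs ++ [(i + 1) - p - 1]) := by
          simp only [pvLoopA, if_pos hx, if_neg (show ¬ t < prev by omega), hs, pvIncLast_append]
          rw [show i - p - 1 + 1 = (i + 1) - p - 1 by omega]
        rw [h1, ih x (i + 1) p _ runs (Or.inl ⟨hx, rfl, by omega⟩), gapsFrom,
          if_neg (show ¬ t < x by omega)]
      · have h1 : pvLoopA t prev (x :: xs) s = pvLoopA t x xs (runs ++ [i - p - 1]) := by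
          simp [pvLoopA, hx, hs]
        rw [h1, ih x (i + 1) i _ (runs ++ [i - p - 1]) (Or.inr ⟨by omega, rfl, by omega⟩),
          gapsFrom, if_pos (show t < x by omega), List.filter_cons]
        simp; omega
    · by_cases hx : x ≤ t
      · have h1 : pvLoopA t prev (x :: xs) s = pvLoopA t x xs (runs ++ [(i + 1) - p - 1]) := by
          simp only [pvLoopA, if_pos hx, if_pos (show t < prev by omega), hs]
          rw [show (i + 1) - p - 1 = 1 by omega]
        rw [h1, ih x (i + 1) p _ runs (Or.inl ⟨hx, rfl, by omega⟩), gapsFrom,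
          if_neg (show ¬ t < x by omega)]
      · have h1 : pvLoopA t prev (x :: xs) s = pvLoopA t x xs runs := by
          simp [pvLoopA, hx, hs]
        rw [h1, ih x (i + 1) i _ runs (Or.inr ⟨by omega, rfl, by omega⟩),
          gapsFrom, if_pos (show t < x by omega), List.filter_cons, hpp]
        simp [show ¬ (0 : Int) < i - (i - 1) - 1 by omega]

-- ===== VERDICT =====
theorem extract_silence_spec : Claim_equal_extract_silence := by
  intro data threshold _ hpre
  unfold Spec_extract_silence
  cases data with
  | nil => exact absurd rfl hpre
  | cons d0 rest =>
    simp only [extract_silence, extract_silence_alt]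
    rw [show ([(-1 : Int)] ++ _ ++ [(((d0 :: rest).length : Nat) : Int)]) =
        ((-1 : Int) :: (((PySem.List.enumerate (d0 :: rest) 0).filter (fun q => threshold < q.2)).map (fun q => q.1)) ++ [(0 : Int) + (((d0 :: rest).length : Nat) : Int)]) by simp]
    rw [pipe_eq threshold (d0 :: rest) 0 (-1)]
    by_cases h0 : d0 ≤ threshold
    · rw [show (if d0 ≤ threshold then [(1 : Int)] else []) = [] ++ [(1 : Int) - (-1) - 1] by simp [h0]]
      rw [pvLoop_gaps threshold rest d0 1 (-1) _ [] (Or.inl ⟨h0, rfl, by omega⟩)]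
      simp [gapsFrom, show ¬ threshold < d0 by omega]
    · rw [show (if d0 ≤ threshold then [(1 : Int)] else []) = ([] : List Int) by simp [h0]]
      rw [pvLoop_gaps threshold rest d0 1 0 [] [] (Or.inr ⟨h0, rfl, by omega⟩)]
      simp [gapsFrom, show threshold < d0 by omega]
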